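-- pv_equiv track=rewrite | github.com/BWSI-RACECAR/code-clash-02-senayt1234 | digitdecrypt.py | digitdecrypt
-- ===== SOURCE A (Python) =====
-- def digitdecrypt(num):
--         #type num: int
--         #return type: int
--         if num == 0:
--            return 0
--         if num<10:
--            return num
--         if num<0:
--            return "place a postive interger"
--         num = str(num)
--         index = 0
--         total = 0
--         while len(num)>index:
--             total = int(num[index])+total
--             index = index +1
--         total = str(total)
--         fun = 0
--         index = 0
--         while len(total)>index:
--             fun = int(total[index])+fun
--             index = index +1
--         return fun
-- ===== SOURCE B (Python) =====
-- def digitdecrypt(num):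
--     # Same result as A: arithmetic digit extraction instead of string indexing.
--     if num < 10:
--         return num
--     def dsum(n):
--         t = 0
--         while n > 0:
--             t += n % 10
--             n //= 10
--         return t
--     return dsum(dsum(num))
-- ===== Notes on version B (the rewrite author's own statement) =====
-- stated objective: idiomatic
-- what changed: B sums digits arithmetically (n%10 / n//=10 loops) instead of converting to a string twice and indexing character by character, and collapses A's three guards into the single equivalent 'num < 10' guard.
import Mathlib
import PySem

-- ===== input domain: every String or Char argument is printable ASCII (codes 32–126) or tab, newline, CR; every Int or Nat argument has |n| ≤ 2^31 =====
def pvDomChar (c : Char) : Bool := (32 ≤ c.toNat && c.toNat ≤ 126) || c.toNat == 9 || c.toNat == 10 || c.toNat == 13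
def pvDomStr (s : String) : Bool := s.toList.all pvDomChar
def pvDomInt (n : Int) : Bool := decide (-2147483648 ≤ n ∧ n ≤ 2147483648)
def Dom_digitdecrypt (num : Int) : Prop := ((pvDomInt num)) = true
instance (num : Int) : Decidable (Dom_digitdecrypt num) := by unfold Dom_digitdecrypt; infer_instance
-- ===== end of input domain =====

-- B replaces A's per-character string digit loops by arithmetic %10 // 10 extraction loops (idiomatic, same cost).

-- ===== PORT A =====
-- int(s[index]) on the single digit characters produced by str() on a nonnegative int:
-- exact there (those characters are always '0'..'9').
def pvDigitVal (c : Char) : Int := (c.toNat : Int) - 48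

-- the while-with-index loop over the string, state (index implicit in the remaining chars, total)
def pvStrSum : List Char → Int → Int
  | [], total => total
  | c :: rest, total => pvStrSum rest (pvDigitVal c + total)

def digitdecrypt (num : Int) : Int :=
  if num = 0 then 0
  else if num < 10 then num
  -- dead branch of A (num < 0 is already caught by num < 10); A's literal return value
  -- here is a string, not an int, but the branch is unreachable, ported as 0
  else if num < 0 then 0
  else
    let s := PySem.Int.toChars num        -- num = str(num)
    let total := pvStrSum s 0             -- first while loop
    let t := PySem.Int.toChars total      -- total = str(total)
    pvStrSum t 0                          -- second while loop, returns fun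

-- ===== PORT B =====
-- while n > 0: t += n % 10; n //= 10
def pvSumLoop (n t : Int) : Int :=
  if h : 0 < n then pvSumLoop (PySem.Int.floordiv n 10) (t + PySem.Int.mod n 10) else t
termination_by n.toNat
decreasing_by
  simp only [PySem.Int.floordiv, Int.fdiv_eq_ediv]
  omega

def digitdecrypt_alt (num : Int) : Int :=
  if num < 10 then num
  else pvSumLoop (pvSumLoop num 0) 0

-- ===== PRECONDITION & SPEC =====
def Spec_digitdecrypt (num : Int) (out : Int) : Prop := out = digitdecrypt_alt num
instance (num : Int) (out : Int) : Decidable (Spec_digitdecrypt num out) := by unfold Spec_digitdecrypt; infer_instance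

-- ===== CLAIM (what is proved, stated in full; the proofs are below) =====
def Claim_equal_digitdecrypt : Prop := ∀ (num : Int), Dom_digitdecrypt num → Spec_digitdecrypt num (digitdecrypt num)

-- ===== LEMMAS AND PROOFS =====

-- reference digit sum on Nat
def pvNatDigitSum (n : Nat) : Nat :=
  if h : n = 0 then 0 else n % 10 + pvNatDigitSum (n / 10)
termination_by n
decreasing_by exact Nat.div_lt_self (Nat.pos_of_ne_zero h) (by norm_num)

def pvCharListSum (cs : List Char) : Int := (cs.map pvDigitVal).sum

theorem pvStrSum_eq (cs : List Char) : ∀ t, pvStrSum cs t = pvCharListSum cs + t := by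
  induction cs with
  | nil => intro t; simp [pvStrSum, pvCharListSum]
  | cons c rest ih =>
    intro t
    rw [pvStrSum, ih]
    simp only [pvCharListSum, List.map_cons, List.sum_cons]
    ring

theorem pvDigitVal_digitChar (d : Nat) (hd : d < 10) :
    pvDigitVal (Nat.digitChar d) = (d : Int) := by
  interval_cases d <;> rfl

theorem pvCharListSum_toDigitsCore (fuel : Nat) :
    ∀ (n : Nat) (ds : List Char), n < fuel →
      pvCharListSum (Nat.toDigitsCore 10 fuel n ds) =
        (pvNatDigitSum n : Int) + pvCharListSum ds := by
  induction fuel with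
  | zero => intro n ds h; omega
  | succ fuel ih =>
    intro n ds h
    rw [Nat.toDigitsCore]
    by_cases h0 : n / 10 = 0
    · simp only [h0, if_true]
      have hlt : n % 10 < 10 := Nat.mod_lt _ (by norm_num)
      have : pvCharListSum ((n % 10).digitChar :: ds) =
          ((n % 10 : Nat) : Int) + pvCharListSum ds := by
        simp [pvCharListSum, pvDigitVal_digitChar _ hlt]
      rw [this]
      by_cases hn : n = 0
      · subst hn; simp [pvNatDigitSum]
      · rw [pvNatDigitSum]
        simp [hn, h0, pvNatDigitSum]
    · simp only [h0, if_false]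
      have hge : 10 ≤ n := by
        by_contra hlt
        exact h0 (Nat.div_eq_of_lt (by omega))
      have hflt : n / 10 < fuel := by
        have := Nat.div_lt_self (by omega : 0 < n) (by norm_num : 1 < 10)
        omega
      rw [ih (n / 10) _ hflt]
      have hlt : n % 10 < 10 := Nat.mod_lt _ (by norm_num)
      have hcons : pvCharListSum ((n % 10).digitChar :: ds) =
          ((n % 10 : Nat) : Int) + pvCharListSum ds := by
        simp [pvCharListSum, pvDigitVal_digitChar _ hlt]
      rw [hcons]
      have hstep : pvNatDigitSum n = n % 10 + pvNatDigitSum (n / 10) := by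
        conv_lhs => rw [pvNatDigitSum]
        simp [show ¬ n = 0 by omega]
      rw [hstep]
      push_cast
      ring

-- A's string digit-sum over str(n) equals the reference digit sum, for n ≥ 0
theorem pvStrSum_toChars (n : Int) (hn : 0 ≤ n) :
    pvStrSum (PySem.Int.toChars n) 0 = (pvNatDigitSum n.toNat : Int) := by
  have hchars : PySem.Int.toChars n = Nat.toDigits 10 n.toNat := by
    simp [PySem.Int.toChars]
    omega
  rw [hchars, Nat.toDigits, pvStrSum_eq,
      pvCharListSum_toDigitsCore (n.toNat + 1) n.toNat [] (by omega)]
  simp [pvCharListSum]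

-- B's arithmetic loop equals the reference digit sum, for nonnegative start
theorem pvSumLoop_eq (m : Nat) : ∀ t : Int, pvSumLoop (m : Int) t = (pvNatDigitSum m : Int) + t := by
  induction m using Nat.strong_induction_on with
  | _ m ih =>
    intro t
    rw [pvSumLoop]
    by_cases hm : m = 0
    · subst hm; simp [pvNatDigitSum]
    · have hpos : (0 : Int) < (m : Int) := by positivity
      simp only [hpos, dif_pos]
      have hfd : PySem.Int.floordiv (m : Int) 10 = ((m / 10 : Nat) : Int) := by
        simp [PySem.Int.floordiv, Int.fdiv_eq_ediv]
      have hfm : PySem.Int.mod (m : Int) 10 = ((m % 10 : Nat) : Int) := by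
        simp [PySem.Int.mod, Int.fmod_eq_emod]
      rw [hfd, hfm, ih (m / 10) (Nat.div_lt_self (by omega) (by norm_num))]
      have hstep : pvNatDigitSum m = m % 10 + pvNatDigitSum (m / 10) := by
        conv_lhs => rw [pvNatDigitSum]
        simp [hm]
      rw [hstep]
      push_cast
      ring

theorem pvSumLoop_nonneg_eq (n : Int) (hn : 0 ≤ n) :
    pvSumLoop n 0 = (pvNatDigitSum n.toNat : Int) := by
  obtain ⟨m, rfl⟩ : ∃ m : Nat, n = (m : Int) := ⟨n.toNat, by omega⟩
  rw [pvSumLoop_eq]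
  simp

-- ===== VERDICT (by name: the statement is the Claim_ definition above) =====
theorem digitdecrypt_spec : Claim_equal_digitdecrypt := by
  intro num _
  unfold Spec_digitdecrypt digitdecrypt digitdecrypt_alt
  by_cases hlt : num < 10
  · by_cases h0 : num = 0 <;> simp [h0, hlt]
  · have hge : (10 : Int) ≤ num := by omega
    have hne : ¬ num = 0 := by omega
    have hnn : ¬ num < 0 := by omega
    simp only [hne, hlt, hnn, if_false]
    have h1 : pvStrSum (PySem.Int.toChars num) 0 = (pvNatDigitSum num.toNat : Int) :=
      pvStrSum_toChars num (by omega)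
    rw [h1, pvStrSum_toChars _ (by positivity), pvSumLoop_nonneg_eq num (by omega),
        pvSumLoop_nonneg_eq _ (by positivity)]
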